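-- pv_equiv track=rewrite | github.com/cnam0203/artery_reconstruction | process_graph.py | refine_junction_points
-- ===== SOURCE A (Python) =====
-- def refine_junction_points(skeleton_points, neighbor_distances):
--     """
--     Identify junction points in a skeleton based on neighbor distances.
--
--     This function identifies junction points in a skeleton represented by skeleton_points based on the neighbor distances matrix.
--     A junction point is a point in the skeleton that is connected to three or more other points.
--
--     Args:
--         skeleton_points (list of tuples): A list of points forming the skeleton representation.
--         neighbor_distances (list of lists): A matrix representing the distances between neighboring points.
--             It should be symmetric, with distances from point i to point j being stored at neighbor_distances[i][j].
--
--     Returns: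
--         list: A list containing the indices of identified junction points in the skeleton.
--
--     Example:
--         skeleton_points = [(0, 0), (1, 1), (2, 2), (3, 3)]
--         neighbor_distances = [
--             [0, 3, 0, 2],
--             [3, 0, 5, 0],
--             [0, 5, 0, 4],
--             [2, 0, 4, 0]
--         ]
--         junction_points = refine_junction_points(skeleton_points, neighbor_distances)
--     """
--     junction_points = []
--
--     # Iterate through each point in the skeleton
--     for i in range(len(skeleton_points)):
--         count = 0
--         # Count how many other points each point is connected to
--         for j in range(len(skeleton_points)):
--             if i != j and (neighbor_distances[i][j] > 0 or neighbor_distances[j][i] > 0):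
--                 count += 1
--
--         # If a point is connected to three or more other points, consider it a junction point
--         if count >= 3:
--             junction_points.append(i)
--
--     return junction_points
-- ===== SOURCE B (Python) =====
-- def refine_junction_points(skeleton_points, neighbor_distances):
--     n = len(skeleton_points)
--     # stage 1: one directed scan of the matrix collecting the undirected edge set
--     edges = set()
--     for i in range(n):
--         for j in range(n):
--             if i != j and neighbor_distances[i][j] > 0:
--                 edges.add((i, j) if i < j else (j, i))
--     # stage 2: degree of every endpoint over the deduplicated edges
--     degree = {}
--     for a, b in edges:
--         degree[a] = degree.get(a, 0) + 1
--         degree[b] = degree.get(b, 0) + 1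
--     # stage 3: junctions = indices of degree >= 3
--     return [i for i in range(n) if degree.get(i, 0) >= 3]
-- ===== Notes on version B (the rewrite author's own statement) =====
-- stated objective: alternative
-- what changed: Instead of A's per-point rescan of every full row with two symmetric matrix tests per ordered pair, B runs a staged pipeline: one directed scan of the matrix materializes a deduplicated set of undirected edges, a second pass over that edge set accumulates endpoint degrees in a dictionary, and a final filter keeps indices with degree >= 3; Pre_ excludes only the inputs on which A raises IndexError (an out-of-range access not skipped by or-short-circuiting).
import Mathlib
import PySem

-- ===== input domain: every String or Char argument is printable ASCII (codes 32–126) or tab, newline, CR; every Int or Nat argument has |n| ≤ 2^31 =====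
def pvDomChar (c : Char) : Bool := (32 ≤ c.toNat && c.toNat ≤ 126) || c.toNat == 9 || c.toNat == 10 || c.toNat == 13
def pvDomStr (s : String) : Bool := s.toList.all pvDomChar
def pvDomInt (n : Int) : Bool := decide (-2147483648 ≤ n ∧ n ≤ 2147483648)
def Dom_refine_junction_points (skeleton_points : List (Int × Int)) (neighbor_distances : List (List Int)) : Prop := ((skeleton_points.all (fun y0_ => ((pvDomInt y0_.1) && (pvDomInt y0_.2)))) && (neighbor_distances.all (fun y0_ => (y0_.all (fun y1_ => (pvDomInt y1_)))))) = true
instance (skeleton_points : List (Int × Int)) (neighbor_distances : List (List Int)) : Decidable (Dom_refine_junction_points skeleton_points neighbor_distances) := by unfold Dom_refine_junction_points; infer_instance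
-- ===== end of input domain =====

-- B replaces A's per-point rescan of every full row (two matrix tests per ordered
-- pair) with a staged pipeline: one directed scan of the matrix collects the
-- deduplicated SET of undirected edges, a second pass over that edge set
-- accumulates endpoint degrees in a dictionary, and a final filter keeps the
-- indices of degree ≥ 3.

-- matrix access neighbor_distances[i][j] (in-range on Pre_, where the default 0
-- never decides the connectivity of an admitted input)
def pvEntry (nd : List (List Int)) (i j : Nat) : Int := (nd.getD i []).getD j 0

-- ===== PORT A =====
def refine_junction_points (skeleton_points : List (Int × Int)) (neighbor_distances : List (List Int)) : List Int :=
  (List.range skeleton_points.length).foldl (fun junction_points i =>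
    let count : Int := (List.range skeleton_points.length).foldl (fun c j =>
      if i ≠ j ∧ (0 < pvEntry neighbor_distances i j ∨ 0 < pvEntry neighbor_distances j i) then c + 1 else c) 0
    if 3 ≤ count then junction_points ++ [(i : Int)] else junction_points) []

-- ===== PORT B =====
def refine_junction_points_alt (skeleton_points : List (Int × Int)) (neighbor_distances : List (List Int)) : List Int :=
  let n := skeleton_points.length
  -- stage 1: one directed scan of the matrix collecting the undirected edge set
  let edges : PySem.Set (Nat × Nat) :=
    (List.range n).foldl (fun es i =>
      (List.range n).foldl (fun es j =>
        if i ≠ j ∧ 0 < pvEntry neighbor_distances i j then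
          PySem.Set.add es (if i < j then (i, j) else (j, i)) else es) es)
      PySem.Set.empty
  -- stage 2: degree of every endpoint over the deduplicated edges
  let degree : PySem.Dict Nat Nat :=
    edges.foldl (fun d e =>
      let d1 := d.insert e.1 (d.getD e.1 0 + 1)
      d1.insert e.2 (d1.getD e.2 0 + 1)) PySem.Dict.empty
  -- stage 3: junctions = indices of degree ≥ 3
  ((List.range n).filter (fun i => 3 ≤ degree.getD i 0)).map (fun i : Nat => (i : Int))

-- ===== PRECONDITION & SPEC =====
-- Pre_ admits exactly the inputs on which Python A returns: every connectivity
-- test it performs stays in range, allowing for `or` short-circuiting (when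
-- nd[i][j] > 0, nd[j][i] is never read).
def Pre_refine_junction_points (skeleton_points : List (Int × Int)) (neighbor_distances : List (List Int)) : Prop :=
  ∀ i ∈ List.range skeleton_points.length, ∀ j ∈ List.range skeleton_points.length, i ≠ j →
    i < neighbor_distances.length ∧ j < (neighbor_distances.getD i []).length ∧
      (0 < (neighbor_distances.getD i []).getD j 0 ∨
        (j < neighbor_distances.length ∧ i < (neighbor_distances.getD j []).length))
instance (skeleton_points : List (Int × Int)) (neighbor_distances : List (List Int)) : Decidable (Pre_refine_junction_points skeleton_points neighbor_distances) := by unfold Pre_refine_junction_points; infer_instance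

def pvWitness_refine_junction_points : (List (Int × Int)) × List (List Int) :=
  ([(0, 0), (1, 1), (2, 2)], [[0, 3, 1], [3, 0, 5], [1, 5, 0]])

def Spec_refine_junction_points (skeleton_points : List (Int × Int)) (neighbor_distances : List (List Int)) (out : List Int) : Prop := out = refine_junction_points_alt skeleton_points neighbor_distances
instance (skeleton_points : List (Int × Int)) (neighbor_distances : List (List Int)) (out : List Int) : Decidable (Spec_refine_junction_points skeleton_points neighbor_distances out) := by unfold Spec_refine_junction_points; infer_instance

-- ===== CLAIM (what is proved, stated in full; the proofs are below) =====
def Claim_equal_refine_junction_points : Prop := ∀ (skeleton_points : List (Int × Int)) (neighbor_distances : List (List Int)), Dom_refine_junction_points skeleton_points neighbor_distances → Pre_refine_junction_points skeleton_points neighbor_distances → Spec_refine_junction_points skeleton_points neighbor_distances (refine_junction_points skeleton_points neighbor_distances)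

-- ===== LEMMAS AND PROOFS =====

-- the symmetric connectivity test, as a Bool
def pvConnB (nd : List (List Int)) (i j : Nat) : Bool :=
  decide (0 < pvEntry nd i j ∨ 0 < pvEntry nd j i)

-- the ascending unordered pairs below n, and B's edge as an ordered pair
def pvPairs (n : Nat) : List (Nat × Nat) :=
  (List.range n).flatMap (fun i => (List.range' (i + 1) (n - (i + 1))).map (fun j => (i, j)))

def pvOrd (i j : Nat) : Nat × Nat := if i < j then (i, j) else (j, i)

-- all ordered pairs below n (B's matrix scan order)
def pvAllPairs (n : Nat) : List (Nat × Nat) :=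
  (List.range n).flatMap (fun i => (List.range n).map (fun j => (i, j)))

-- one step of B's edge-collection scan
def pvEStep (nd : List (List Int)) (es : PySem.Set (Nat × Nat)) (p : Nat × Nat) : PySem.Set (Nat × Nat) :=
  if p.1 ≠ p.2 ∧ 0 < pvEntry nd p.1 p.2 then PySem.Set.add es (pvOrd p.1 p.2) else es

-- one step of B's degree accumulation
def pvDStep (d : PySem.Dict Nat Nat) (e : Nat × Nat) : PySem.Dict Nat Nat :=
  let d1 := d.insert e.1 (d.getD e.1 0 + 1)
  d1.insert e.2 (d1.getD e.2 0 + 1)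

-- B's edge set
def pvEdges (nd : List (List Int)) (n : Nat) : PySem.Set (Nat × Nat) :=
  (pvAllPairs n).foldl (pvEStep nd) PySem.Set.empty

-- A's per-point count and the per-point incidence count over the ascending pairs
def pvCntA (nd : List (List Int)) (n i : Nat) : Nat :=
  (List.range n).countP (fun j => decide (i ≠ j ∧ (0 < pvEntry nd i j ∨ 0 < pvEntry nd j i)))

def pvCntB (nd : List (List Int)) (n i : Nat) : Nat :=
  (pvPairs n).countP (fun p => pvConnB nd p.1 p.2 && (p.1 == i || p.2 == i))

theorem pv_foldl_flatMap {α β γ : Type} (g : γ → List α) (F : β → α → β) :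
    ∀ (L : List γ) (init : β), (L.flatMap g).foldl F init = L.foldl (fun d i => (g i).foldl F d) init := by
  intro L
  induction L with
  | nil => intro init; simp
  | cons a t ih => intro init; simp [List.flatMap_cons, List.foldl_append, ih]

theorem pv_countP_flatMap {α γ : Type} (g : γ → List α) (q : α → Bool) :
    ∀ L : List γ, (L.flatMap g).countP q = (L.map (fun a => (g a).countP q)).sum := by
  intro L
  induction L with
  | nil => simp
  | cons a t ih => simp [List.flatMap_cons, List.countP_append, ih]

theorem pv_countP_and_beq (q : Nat → Bool) (i : Nat) :
    ∀ l : List Nat, l.countP (fun j => q j && (j == i)) = if q i then l.count i else 0 := by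
  intro l
  induction l with
  | nil => simp
  | cons a t ih =>
    rw [List.countP_cons, List.count_cons, ih]
    by_cases ha : a = i
    · subst ha; by_cases hq : q a <;> simp [hq]
    · simp [ha]

theorem pv_sum_ite {α : Type} (p : α → Bool) :
    ∀ l : List α, (l.map (fun a => if p a then 1 else 0)).sum = l.countP p := by
  intro l
  induction l with
  | nil => simp
  | cons a t ih => rw [List.map_cons, List.sum_cons, ih, List.countP_cons]; omega

theorem pv_range_split (n i : Nat) (h : i < n) :
    List.range n = List.range i ++ [i] ++ List.range' (i + 1) (n - (i + 1)) := by
  have h1 : n = (i + 1) + (n - (i + 1)) := by omega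
  conv_lhs => rw [h1]
  rw [List.range_add, List.range_succ, List.range'_eq_map_range]

-- the incidence count over ascending pairs equals A's per-point count
theorem pv_count_eq (nd : List (List Int)) (n i : Nat) (hin : i < n) :
    pvCntB nd n i = pvCntA nd n i := by
  unfold pvCntA pvCntB
  rw [pvPairs, pv_countP_flatMap]
  simp only [List.countP_map]
  rw [pv_range_split n i hin]
  simp only [List.map_append, List.sum_append, List.countP_append]
  have hmid : ∀ a : Nat, ((fun p : Nat × Nat => pvConnB nd p.1 p.2 && (p.1 == i || p.2 == i)) ∘ (fun j => (a, j))) = fun j => pvConnB nd a j && (a == i || j == i) := by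
    intro a; rfl
  simp only [hmid]
  -- low part of the pair sum
  have hlo : ((List.range i).map (fun a => (List.range' (a + 1) (n - (a + 1))).countP (fun j => pvConnB nd a j && (a == i || j == i)))).sum
      = (List.range i).countP (fun a => pvConnB nd a i) := by
    rw [← pv_sum_ite (fun a => pvConnB nd a i) (List.range i)]
    apply congrArg
    apply List.map_congr_left
    intro a ha
    rw [List.mem_range] at ha
    have hane : (a == i) = false := by simp; omega
    have : (fun j => pvConnB nd a j && (a == i || j == i)) = fun j => pvConnB nd a j && (j == i) := by
      funext j; rw [hane]; simp
    rw [this, pv_countP_and_beq]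
    have hmem : i ∈ List.range' (a + 1) (n - (a + 1)) := by
      rw [List.mem_range'_1]; omega
    by_cases hc : pvConnB nd a i = true
    · rw [if_pos hc, if_pos hc, List.count_eq_one_of_mem (List.nodup_range' 1) hmem]
    · simp at hc; simp [hc]
  -- middle term of the pair sum
  have hmidv : ([i].map (fun a => (List.range' (a + 1) (n - (a + 1))).countP (fun j => pvConnB nd a j && (a == i || j == i)))).sum
      = (List.range' (i + 1) (n - (i + 1))).countP (fun j => pvConnB nd i j) := by
    simp only [List.map_cons, List.map_nil, List.sum_cons, List.sum_nil, Nat.add_zero]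
    apply List.countP_congr
    intro j _
    simp
  -- high part of the pair sum is zero
  have hhi : ((List.range' (i + 1) (n - (i + 1))).map (fun a => (List.range' (a + 1) (n - (a + 1))).countP (fun j => pvConnB nd a j && (a == i || j == i)))).sum = 0 := by
    have : ∀ a ∈ List.range' (i + 1) (n - (i + 1)), (List.range' (a + 1) (n - (a + 1))).countP (fun j => pvConnB nd a j && (a == i || j == i)) = 0 := by
      intro a ha
      rw [List.mem_range'_1] at ha
      have hane : (a == i) = false := by simp; omega
      have : (fun j => pvConnB nd a j && (a == i || j == i)) = fun j => pvConnB nd a j && (j == i) := by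
        funext j; rw [hane]; simp
      rw [this, pv_countP_and_beq]
      have hnm : i ∉ List.range' (a + 1) (n - (a + 1)) := by
        rw [List.mem_range'_1]; omega
      rw [List.count_eq_zero_of_not_mem hnm]
      simp
    rw [List.map_congr_left this]
    simp
  rw [hlo, hmidv, hhi]
  -- now the A side, split the same way
  have halo : (List.range i).countP (fun j => decide (i ≠ j ∧ (0 < pvEntry nd i j ∨ 0 < pvEntry nd j i)))
      = (List.range i).countP (fun a => pvConnB nd a i) := by
    apply List.countP_congr
    intro j hj
    rw [List.mem_range] at hj
    have : i ≠ j := by omega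
    simp [pvConnB, this, or_comm]
  have hamid : ([i].countP (fun j => decide (i ≠ j ∧ (0 < pvEntry nd i j ∨ 0 < pvEntry nd j i)))) = 0 := by
    simp
  have hahi : (List.range' (i + 1) (n - (i + 1))).countP (fun j => decide (i ≠ j ∧ (0 < pvEntry nd i j ∨ 0 < pvEntry nd j i)))
      = (List.range' (i + 1) (n - (i + 1))).countP (fun j => pvConnB nd i j) := by
    apply List.countP_congr
    intro j hj
    rw [List.mem_range'_1] at hj
    have : i ≠ j := by omega
    simp [pvConnB, this]
  rw [halo, hamid, hahi]
  omega

theorem pv_A_closed (sp : List (Int × Int)) (nd : List (List Int)) :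
    refine_junction_points sp nd =
      ((List.range sp.length).filter (fun i => 3 ≤ pvCntA nd sp.length i)).map (fun i : Nat => (i : Int)) := by
  unfold refine_junction_points
  simp only [PySem.List.foldl_ite_add_one, PySem.List.foldl_append_ite, List.nil_append]
  apply congrArg
  apply List.filter_congr
  intro i _
  unfold pvCntA
  simp only [decide_eq_decide]
  omega

-- membership in B's edge-collection fold
theorem pv_mem_foldl_estep (nd : List (List Int)) :
    ∀ (l : List (Nat × Nat)) (s : PySem.Set (Nat × Nat)) (e : Nat × Nat),
      e ∈ l.foldl (pvEStep nd) s ↔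
        e ∈ s ∨ ∃ p ∈ l, (p.1 ≠ p.2 ∧ 0 < pvEntry nd p.1 p.2) ∧ e = pvOrd p.1 p.2 := by
  intro l
  induction l with
  | nil => intro s e; simp
  | cons p t ih =>
    intro s e
    rw [List.foldl_cons, ih]
    unfold pvEStep
    constructor
    · rintro (hs | ⟨q, hq, hcq, rfl⟩)
      · split at hs
        · rcases (PySem.Set.mem_add ..).1 hs with h | h
          · exact Or.inl h
          · exact Or.inr ⟨p, List.mem_cons_self .., by assumption, h⟩
        · exact Or.inl hs
      · exact Or.inr ⟨q, List.mem_cons_of_mem _ hq, hcq, rfl⟩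
    · rintro (hs | ⟨q, hq, hcq, rfl⟩)
      · left; split
        · exact (PySem.Set.mem_add ..).2 (Or.inl hs)
        · exact hs
      · rcases List.mem_cons.1 hq with rfl | hq
        · left; rw [if_pos hcq]; exact (PySem.Set.mem_add ..).2 (Or.inr rfl)
        · exact Or.inr ⟨q, hq, hcq, rfl⟩

theorem pv_nodup_foldl_estep (nd : List (List Int)) :
    ∀ (l : List (Nat × Nat)) (s : PySem.Set (Nat × Nat)), s.Nodup → (l.foldl (pvEStep nd) s).Nodup := by
  intro l
  induction l with
  | nil => intro s h; exact h
  | cons p t ih =>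
    intro s h
    rw [List.foldl_cons]
    apply ih
    unfold pvEStep
    split
    · exact PySem.Set.nodup_add _ _ h
    · exact h

theorem pv_mem_allPairs (n : Nat) (p : Nat × Nat) : p ∈ pvAllPairs n ↔ p.1 < n ∧ p.2 < n := by
  cases p with
  | mk a b =>
    simp only [pvAllPairs, List.mem_flatMap, List.mem_map, List.mem_range, Prod.mk.injEq]
    constructor
    · rintro ⟨i, hi, j, hj, rfl, rfl⟩; exact ⟨hi, hj⟩
    · rintro ⟨ha, hb⟩; exact ⟨a, ha, b, hb, rfl, rfl⟩

-- B's edge set holds exactly the ascending connected pairs below n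
theorem pv_mem_edges (nd : List (List Int)) (n : Nat) (e : Nat × Nat) :
    e ∈ pvEdges nd n ↔ e.1 < e.2 ∧ e.2 < n ∧ pvConnB nd e.1 e.2 = true := by
  unfold pvEdges
  rw [pv_mem_foldl_estep]
  simp only [PySem.Set.empty, List.not_mem_nil, false_or]
  constructor
  · rintro ⟨p, hp, ⟨hne, hpos⟩, rfl⟩
    rw [pv_mem_allPairs] at hp
    unfold pvOrd
    rcases Nat.lt_or_ge p.1 p.2 with hlt | hge
    · rw [if_pos hlt]
      exact ⟨hlt, hp.2, by simp [pvConnB]; exact Or.inl hpos⟩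
    · have hlt : p.2 < p.1 := by omega
      rw [if_neg (by omega)]
      exact ⟨hlt, hp.1, by simp [pvConnB]; exact Or.inr hpos⟩
  · rintro ⟨hlt, hn, hconn⟩
    simp only [pvConnB, decide_eq_true_eq] at hconn
    rcases hconn with hpos | hpos
    · refine ⟨(e.1, e.2), ?_, ⟨by omega, hpos⟩, ?_⟩
      · rw [pv_mem_allPairs]; exact ⟨by omega, hn⟩
      · unfold pvOrd; rw [if_pos hlt]
    · refine ⟨(e.2, e.1), ?_, ⟨by omega, hpos⟩, ?_⟩
      · rw [pv_mem_allPairs]; exact ⟨hn, by omega⟩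
      · unfold pvOrd; rw [if_neg (by omega)]

-- degree accumulation: the dictionary ends up holding incidence counts
theorem pv_deg_fold (k : Nat) :
    ∀ (l : List (Nat × Nat)) (d : PySem.Dict Nat Nat), (∀ e ∈ l, e.1 ≠ e.2) →
      (l.foldl pvDStep d).getD k 0 =
        d.getD k 0 + l.countP (fun e => e.1 == k || e.2 == k) := by
  intro l
  induction l with
  | nil => intro d _; simp
  | cons e t ih =>
    intro d h
    have hne : e.1 ≠ e.2 := h e (List.mem_cons_self ..)
    rw [List.foldl_cons, ih _ (fun q hq => h q (List.mem_cons_of_mem _ hq)), List.countP_cons]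
    have hstep : (pvDStep d e).getD k 0 =
        d.getD k 0 + ((if e.1 = k then 1 else 0) + (if e.2 = k then 1 else 0)) := by
      unfold pvDStep
      simp only [PySem.Dict.getD_insert]
      by_cases h1 : k = e.1 <;> by_cases h2 : k = e.2 <;> simp_all <;> omega
    rw [hstep]
    by_cases h1 : e.1 = k <;> by_cases h2 : e.2 = k <;> simp [h1, h2] <;> omega

theorem pv_mem_pairs (n : Nat) (p : Nat × Nat) : p ∈ pvPairs n ↔ p.1 < p.2 ∧ p.2 < n := by
  cases p with
  | mk a b =>
    simp only [pvPairs, List.mem_flatMap, List.mem_map, List.mem_range, List.mem_range'_1, Prod.mk.injEq]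
    constructor
    · rintro ⟨i, hi, j, hj, rfl, rfl⟩; omega
    · rintro ⟨hab, hb⟩; exact ⟨a, by omega, b, by omega, rfl, rfl⟩

theorem pv_nodup_pairs (n : Nat) : (pvPairs n).Nodup := by
  unfold pvPairs
  rw [List.nodup_flatMap]
  constructor
  · intro i _
    exact (List.nodup_range' 1).map (fun a b hab => by simpa using congrArg Prod.snd hab)
  · apply List.Pairwise.imp ?_ (List.pairwise_lt_range)
    intro a b hab x hxa hxb
    simp only [List.mem_map] at hxa hxb
    obtain ⟨j, _, rfl⟩ := hxa
    obtain ⟨j', _, h⟩ := hxb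
    exact absurd (congrArg Prod.fst h) (by simp; omega)

-- B in closed form
theorem pv_B_closed (sp : List (Int × Int)) (nd : List (List Int)) :
    refine_junction_points_alt sp nd =
      ((List.range sp.length).filter (fun i => 3 ≤ pvCntB nd sp.length i)).map (fun i : Nat => (i : Int)) := by
  unfold refine_junction_points_alt
  simp only []
  have hE : (List.range sp.length).foldl (fun es i =>
      (List.range sp.length).foldl (fun es j =>
        if i ≠ j ∧ 0 < pvEntry nd i j then
          PySem.Set.add es (if i < j then (i, j) else (j, i)) else es) es)
      PySem.Set.empty = pvEdges nd sp.length := by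
    unfold pvEdges pvAllPairs
    rw [pv_foldl_flatMap]
    apply PySem.List.foldl_congr_mem
    intro es i _
    rw [List.foldl_map]
    apply PySem.List.foldl_congr_mem
    intro es' j _
    rfl
  rw [hE]
  apply congrArg
  apply List.filter_congr
  intro i _
  have hwf : ∀ e ∈ pvEdges nd sp.length, e.1 ≠ e.2 := by
    intro e he
    have := (pv_mem_edges nd sp.length e).1 he
    omega
  have hD : (fun (d : PySem.Dict Nat Nat) (e : Nat × Nat) =>
      (d.insert e.1 (d.getD e.1 0 + 1)).insert e.2
        ((d.insert e.1 (d.getD e.1 0 + 1)).getD e.2 0 + 1)) = pvDStep := rfl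
  rw [hD, pv_deg_fold i (pvEdges nd sp.length) PySem.Dict.empty hwf]
  have hperm : (pvEdges nd sp.length).Perm
      ((pvPairs sp.length).filter (fun p => pvConnB nd p.1 p.2)) := by
    apply (List.perm_ext_iff_of_nodup ?_ ?_).2
    · intro e
      rw [pv_mem_edges, List.mem_filter, pv_mem_pairs]
      tauto
    · exact pv_nodup_foldl_estep nd _ _ (List.nodup_nil)
    · exact (pv_nodup_pairs sp.length).filter _
  rw [PySem.Dict.getD_empty, Nat.zero_add, hperm.countP_eq, List.countP_filter]
  unfold pvCntB
  have hcomm : (fun a : Nat × Nat => (a.1 == i || a.2 == i) && pvConnB nd a.1 a.2)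
      = (fun p : Nat × Nat => pvConnB nd p.1 p.2 && (p.1 == i || p.2 == i)) :=
    funext fun p => Bool.and_comm ..
  rw [hcomm]

-- ===== VERDICT (by name: the statement is the Claim_ definition above) =====
theorem refine_junction_points_spec : Claim_equal_refine_junction_points := by
  intro sp nd _ _
  unfold Spec_refine_junction_points
  rw [pv_A_closed, pv_B_closed]
  apply congrArg
  apply List.filter_congr
  intro i hi
  rw [List.mem_range] at hi
  rw [pv_count_eq nd sp.length i hi]
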